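-- pv_equiv track=rewrite | github.com/Iris-YangY/Python2 | hw8.py | word_positions
-- ===== SOURCE A (Python) =====
-- def word_positions(string):
--     lst = string.split()
--     D = {}
--     for i in range(len(lst)):
--         if lst[i] not in D:
--             D[lst[i]] = [i]
--         else:
--             D[lst[i]].append(i)
--     return D
-- ===== SOURCE B (Python) =====
-- def word_positions(string):
--     words = string.split()
--     return {w: [i for i, x in enumerate(words) if x == w]
--             for w in dict.fromkeys(words)}
-- ===== Notes on version B (the rewrite author's own statement) =====
-- stated objective: idiomatic
-- what changed: B replaces A's single incremental dict-building index loop with a dict comprehension: it dedups the token list once (dict.fromkeys, preserving first-occurrence order) and, for each distinct word, collects its positions by an independent enumerate-and-filter scan of the full token list.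
import Mathlib
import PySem

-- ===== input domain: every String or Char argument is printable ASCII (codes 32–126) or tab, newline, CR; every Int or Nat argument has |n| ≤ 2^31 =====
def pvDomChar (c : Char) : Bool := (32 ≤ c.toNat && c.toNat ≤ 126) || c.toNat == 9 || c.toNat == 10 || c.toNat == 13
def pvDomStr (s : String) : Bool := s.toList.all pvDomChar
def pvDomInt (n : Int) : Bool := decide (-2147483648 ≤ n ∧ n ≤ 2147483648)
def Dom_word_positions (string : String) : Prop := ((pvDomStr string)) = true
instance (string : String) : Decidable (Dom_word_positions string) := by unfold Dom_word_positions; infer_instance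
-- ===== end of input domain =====

-- B rebuilds the word→positions map idiomatically: dedup the tokens once, then one
-- enumerate-and-filter scan per distinct word, instead of A's incremental index loop.


-- ===== PORT A =====
def word_positions (string : String) : List (String × List Int) :=
  let lst := PySem.Str.split₀ string
  let D := (PySem.List.pyRange 0 (PySem.List.len lst) 1).foldl
    (fun D i =>
      let w := PySem.List.pyGetD lst i ""
      if D.contains w = false then D.insert w [i]
      else D.insert w (D.getD w [] ++ [i]))
    PySem.Dict.empty
  D.items

-- ===== PORT B =====
def word_positions_alt (string : String) : List (String × List Int) :=
  let words := PySem.Str.split₀ string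
  (PySem.List.dedup words).map (fun w =>
    (w, ((PySem.List.enumerate words).filter (fun p => p.2 == w)).map (·.1)))

-- ===== PRECONDITION & SPEC =====
def Spec_word_positions (string : String) (out : List (String × List Int)) : Prop := out = word_positions_alt string
instance (string : String) (out : List (String × List Int)) : Decidable (Spec_word_positions string out) := by unfold Spec_word_positions; infer_instance

-- ===== CLAIM (what is proved, stated in full; the proofs are below) =====
def Claim_equal_word_positions : Prop := ∀ (string : String), Dom_word_positions string → Spec_word_positions string (word_positions string)

-- ===== LEMMAS AND PROOFS =====

-- A's branch on membership is exactly Dict.modify with default [].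
lemma step_eq_modify (d : PySem.Dict String (List Int)) (w : String) (i : Int) :
    (if d.contains w = false then d.insert w [i]
     else d.insert w (d.getD w [] ++ [i])) = d.modify w [] (· ++ [i]) := by
  by_cases h : d.contains w = true
  · simp [h, PySem.Dict.modify]
  · simp at h
    simp [h, PySem.Dict.modify, PySem.Dict.getD_of_not_contains _ _ h]

lemma dict_eq (lst : List String) :
    (PySem.List.pyRange 0 (PySem.List.len lst) 1).foldl
      (fun D i =>
        let w := PySem.List.pyGetD lst i ""
        if D.contains w = false then D.insert w [i]
        else D.insert w (D.getD w [] ++ [i]))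
      PySem.Dict.empty
    = ((PySem.List.enumerate lst 0).map (fun p => (p.2, p.1))).foldl
        (fun d p => d.modify p.1 [] (· ++ [p.2])) PySem.Dict.empty := by
  rw [PySem.List.enumerate_eq_map_pyRange lst ""]
  rw [List.map_map, List.foldl_map]
  apply PySem.List.foldl_congr_mem
  intro d i _
  simpa using step_eq_modify d (PySem.List.pyGetD lst i "") i

theorem word_positions_spec' (string : String) :
    word_positions string = word_positions_alt string := by
  show ((PySem.List.pyRange 0 (PySem.List.len (PySem.Str.split₀ string)) 1).foldl _ PySem.Dict.empty).items = _
  set lst := PySem.Str.split₀ string with hlst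
  rw [dict_eq]
  set l' := (PySem.List.enumerate lst 0).map (fun p => (p.2, p.1)) with hl'
  set d := l'.foldl (fun d p => d.modify p.1 [] (· ++ [p.2])) PySem.Dict.empty with hd
  have hkeys : d.keys = PySem.List.dedup lst := by
    rw [hd, PySem.Dict.keys_foldl_modify_key l' (·.1) ([] : List Int)
          (fun _ (p : String × Int) v => v ++ [p.2]) PySem.Dict.empty]
    rw [hl', List.map_map]
    have : ((fun (x : String × Int) => x.1) ∘ fun p : Int × String => (p.2, p.1)) = (fun p : Int × String => p.2) := rfl
    rw [this, PySem.List.map_snd_enumerate]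
    simp [PySem.Dict.keys_empty, PySem.Set.update_nil_left]
  have hnd : d.keys.Nodup := by
    rw [hkeys]; exact PySem.List.nodup_dedup lst
  rw [PySem.Dict.items_eq_map_keys d hnd []]
  rw [hkeys]
  apply List.map_congr_left
  intro w _
  have hv : d.getD w [] = (l'.filter (fun p => p.1 == w)).map (·.2) := by
    rw [hd]
    simpa using PySem.Dict.getD_foldl_modify_append (l := l')
      (d := (PySem.Dict.empty : PySem.Dict String (List Int))) (c := w)
  rw [hv, hl', List.filter_map, List.map_map]
  rfl

-- ===== VERDICT (by name: the statement is the Claim_ definition above) =====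
theorem word_positions_spec : Claim_equal_word_positions := by
  intro s _
  exact word_positions_spec' s
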